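-- pv_equiv track=rewrite | github.com/11acc/mastermind_clone | code_search.py | identify_flat_pins
-- ===== SOURCE A (Python) =====
-- def identify_flat_pins(pins, dimensions):
--   # Runtime complexity:
--   #   Worst-case    : O(n^2)
--   #   Average-case  : O(n^2)
--   # identify_flat_pins() identifies which location would the pins be
--   #   in a 2d array from the 1d version of the array
--   found_pins = []
--   row_l = int(dimensions[0])
--
--   for pin in pins:
--     row, col = -1, -1
--     counter = 0
--     temp = pin
--     if temp < row_l:
--       row = 0
--       col = temp
--     else:
--       while temp > row_l:
--         temp -= row_l
--         counter += 1
--       row = counter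
--       col = temp
--     found_pins.append([row, col])
--
--   return found_pins
-- ===== SOURCE B (Python) =====
-- def identify_flat_pins(pins, dimensions):
--   # Closed-form divmod (shifted by 1 to reproduce the strict ">" loop boundary,
--   # which leaves col == row_l for exact multiples) instead of repeated subtraction.
--   row_l = int(dimensions[0])
--   return [[0, p] if p < row_l else [(p - 1) // row_l, (p - 1) % row_l + 1]
--           for p in pins]
-- ===== Notes on version B (the rewrite author's own statement) =====
-- stated objective: simpler
-- what changed: replaces the per-pin repeated-subtraction while-loop with closed-form divmod arithmetic on pin-1 (matching A's strict '>' loop boundary), computed in a single list comprehension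
-- outside the precondition, e.g. on identify_flat_pins([0], [0]): A returns [[0, 0]], B raises ZeroDivisionError; on identify_flat_pins([-2], [-2]): A returns [[0, -2]], B returns [[1, 0]]
import Mathlib
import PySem

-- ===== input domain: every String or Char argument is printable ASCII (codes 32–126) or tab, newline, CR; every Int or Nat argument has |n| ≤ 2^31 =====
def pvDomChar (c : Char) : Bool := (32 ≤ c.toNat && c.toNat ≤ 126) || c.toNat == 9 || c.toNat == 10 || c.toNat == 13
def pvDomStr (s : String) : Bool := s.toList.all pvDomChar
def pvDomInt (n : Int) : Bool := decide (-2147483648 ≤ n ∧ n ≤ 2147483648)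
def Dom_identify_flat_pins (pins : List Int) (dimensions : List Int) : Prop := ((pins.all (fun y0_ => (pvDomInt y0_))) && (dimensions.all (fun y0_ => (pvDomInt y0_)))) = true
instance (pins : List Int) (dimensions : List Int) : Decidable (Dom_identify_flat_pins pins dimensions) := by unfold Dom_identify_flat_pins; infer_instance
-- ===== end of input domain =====

-- B replaces A's per-pin repeated-subtraction loop with closed-form divmod on pin-1 (simpler: one comprehension, no inner loop).

-- ===== PORT A =====
-- the 'while temp > row_l: temp -= row_l; counter += 1' loop; the 'row_l > 0' guard
-- only makes the recursion total (in Python the loop diverges when row_l ≤ 0, which Pre_ excludes)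
def pvWhileA (row_l temp counter : Int) : Int × Int :=
  if _h : row_l < temp ∧ 0 < row_l then pvWhileA row_l (temp - row_l) (counter + 1)
  else (temp, counter)
termination_by (temp - row_l).toNat
decreasing_by omega

def identify_flat_pins (pins : List Int) (dimensions : List Int) : List (List Int) :=
  let row_l := (PySem.List.pyGet? dimensions 0).getD 0
  pins.foldl (fun found_pins pin =>
    if pin < row_l then
      found_pins ++ [[0, pin]]
    else
      let tc := pvWhileA row_l pin 0
      found_pins ++ [[tc.2, tc.1]]) []

-- ===== PORT B =====
def identify_flat_pins_alt (pins : List Int) (dimensions : List Int) : List (List Int) :=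
  let row_l := (PySem.List.pyGet? dimensions 0).getD 0
  pins.map (fun p =>
    if p < row_l then [0, p]
    else [PySem.Int.floordiv (p - 1) row_l, PySem.Int.mod (p - 1) row_l + 1])

-- ===== PRECONDITION & SPEC =====
-- Pre_ excludes empty dimensions (A raises IndexError) and row lengths row_l ≤ 0 with some
-- pin ≥ row_l, outside the natural grid domain: there A diverges (pin > row_l) or, when
-- pin == row_l, returns a degenerate position that B's divmod naturally cannot produce.
def Pre_identify_flat_pins (pins : List Int) (dimensions : List Int) : Prop :=
  dimensions ≠ [] ∧ (0 < dimensions.headD 0 ∨ ∀ p ∈ pins, p < dimensions.headD 0)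
instance (pins : List Int) (dimensions : List Int) : Decidable (Pre_identify_flat_pins pins dimensions) := by unfold Pre_identify_flat_pins; infer_instance

def pvWitness_identify_flat_pins : List Int × List Int := ([0, 3, 4, 8, 11], [4, 3])

def Spec_identify_flat_pins (pins : List Int) (dimensions : List Int) (out : List (List Int)) : Prop := out = identify_flat_pins_alt pins dimensions
instance (pins : List Int) (dimensions : List Int) (out : List (List Int)) : Decidable (Spec_identify_flat_pins pins dimensions out) := by unfold Spec_identify_flat_pins; infer_instance

-- ===== CLAIM (what is proved, stated in full; the proofs are below) =====
def Claim_equal_identify_flat_pins : Prop := ∀ (pins : List Int) (dimensions : List Int), Dom_identify_flat_pins pins dimensions → Pre_identify_flat_pins pins dimensions → Spec_identify_flat_pins pins dimensions (identify_flat_pins pins dimensions)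

-- ===== LEMMAS AND PROOFS =====

-- the while loop computes the shifted divmod of its starting value
theorem pvWhileA_closed (row_l temp counter : Int) (hb : 0 < row_l) (ht : 1 ≤ temp) :
    pvWhileA row_l temp counter = ((temp - 1) % row_l + 1, counter + (temp - 1) / row_l) := by
  rw [pvWhileA]
  split_ifs with h
  · rw [pvWhileA_closed row_l (temp - row_l) (counter + 1) hb (by omega)]
    have h1 : temp - row_l - 1 = (temp - 1) + (-1) * row_l := by ring
    have h2 : (temp - 1 + (-1) * row_l) % row_l = (temp - 1) % row_l :=
      Int.add_mul_emod_self_right (temp - 1) (-1) row_l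
    have h3 : (temp - 1 + (-1) * row_l) / row_l = (temp - 1) / row_l + (-1) :=
      Int.add_mul_ediv_right _ _ (by omega)
    rw [h1, h2, h3]
    exact Prod.ext rfl (by ring)
  · have hle : temp ≤ row_l := by omega
    have h0 : 0 ≤ temp - 1 := by omega
    have h1 : temp - 1 < row_l := by omega
    rw [Int.emod_eq_of_lt h0 h1, Int.ediv_eq_zero_of_lt h0 h1]
    exact Prod.ext (by ring) (by ring)
termination_by (temp - row_l).toNat
decreasing_by omega

theorem per_pin (row_l pin : Int) (h : 0 < row_l ∨ pin < row_l) :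
    (if pin < row_l then [0, pin]
     else [(pvWhileA row_l pin 0).2, (pvWhileA row_l pin 0).1]) =
    (if pin < row_l then [(0 : Int), pin]
     else [PySem.Int.floordiv (pin - 1) row_l, PySem.Int.mod (pin - 1) row_l + 1]) := by
  split_ifs with hlt
  · rfl
  · have hb : 0 < row_l := by tauto
    have hp : 1 ≤ pin := by omega
    rw [pvWhileA_closed row_l pin 0 hb hp,
        PySem.Int.floordiv_eq_ediv_of_pos hb, PySem.Int.mod_eq_emod_of_pos hb]
    simp

theorem headD_eq_pyGetD (dimensions : List Int) (hne : dimensions ≠ []) :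
    (PySem.List.pyGet? dimensions 0).getD 0 = dimensions.headD 0 := by
  cases dimensions with
  | nil => exact absurd rfl hne
  | cons d ds => simp [PySem.List.pyGet?, PySem.List.pyIdx?]

-- ===== VERDICT (by name: the statement is the Claim_ definition above) =====
theorem identify_flat_pins_spec : Claim_equal_identify_flat_pins := by
  intro pins dimensions _hDom hPre
  obtain ⟨hne, hcase⟩ := hPre
  unfold Spec_identify_flat_pins identify_flat_pins identify_flat_pins_alt
  dsimp only
  rw [headD_eq_pyGetD dimensions hne]
  set row_l := dimensions.headD 0 with hrl
  have hfun : (fun (found_pins : List (List Int)) (pin : Int) =>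
      if pin < row_l then found_pins ++ [[0, pin]]
      else found_pins ++ [[(pvWhileA row_l pin 0).2, (pvWhileA row_l pin 0).1]]) =
      (fun found_pins pin => found_pins ++
        [if pin < row_l then [0, pin]
         else [(pvWhileA row_l pin 0).2, (pvWhileA row_l pin 0).1]]) := by
    funext acc pin; split_ifs <;> rfl
  rw [hfun, PySem.List.foldl_append_singleton_eq_map, List.nil_append]
  apply List.map_congr_left
  intro p hp
  have hcond : 0 < row_l ∨ p < row_l := by
    rcases hcase with h | h
    · exact Or.inl h
    · exact Or.inr (h p hp)
  exact per_pin row_l p hcond
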